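-- pv_equiv track=rewrite | github.com/AlvinKuruvilla/keystroke-data | samples.py | balance_lists
-- ===== SOURCE A (Python) =====
-- def balance_lists(release, press):
--     if len(press) > len(release):
--         while len(release) < len(press):
--             press.pop()
--     else:
--         while len(release) > len(press):
--             release.pop()
--     return (release, press)
-- ===== SOURCE B (Python) =====
-- def balance_lists(release, press):
--     n = min(len(release), len(press))
--     del release[n:]
--     del press[n:]
--     return (release, press)
-- ===== Notes on version B (the rewrite author's own statement) =====
-- stated objective: simpler
-- what changed: Replaces the if/else with two element-by-element while/pop loops by computing the common length n = min(len,len) once and trimming both lists with a single slice deletion each (same in-place mutation).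
import Mathlib
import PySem

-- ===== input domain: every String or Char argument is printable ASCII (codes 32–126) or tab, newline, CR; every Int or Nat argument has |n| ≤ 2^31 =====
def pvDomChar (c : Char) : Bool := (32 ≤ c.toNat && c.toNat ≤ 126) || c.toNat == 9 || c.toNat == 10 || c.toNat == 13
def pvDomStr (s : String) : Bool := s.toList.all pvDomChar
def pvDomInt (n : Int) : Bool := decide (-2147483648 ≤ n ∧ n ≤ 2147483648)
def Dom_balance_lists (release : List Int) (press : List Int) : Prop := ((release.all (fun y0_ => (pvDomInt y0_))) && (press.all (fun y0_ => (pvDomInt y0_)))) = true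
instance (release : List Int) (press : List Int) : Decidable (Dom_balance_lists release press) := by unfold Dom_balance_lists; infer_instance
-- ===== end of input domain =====

-- ===== PORT A =====
-- A: while the list is longer than target, pop the last element (press.pop())
def popUntil (xs : List Int) (target : Nat) : List Int :=
  if xs.length > target then popUntil xs.dropLast target else xs
termination_by xs.length
decreasing_by simp [List.length_dropLast]; omega

def balance_lists (release : List Int) (press : List Int) : List Int × List Int :=
  if press.length > release.length then
    (release, popUntil press release.length)
  else
    (popUntil release press.length, press)

-- ===== PORT B =====
-- B: n = min(len(release), len(press)); del release[n:]; del press[n:]  (trim = take n)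
def balance_lists_alt (release : List Int) (press : List Int) : List Int × List Int :=
  let n := min release.length press.length
  (release.take n, press.take n)

-- ===== PRECONDITION & SPEC =====
def Spec_balance_lists (release : List Int) (press : List Int) (out : List Int × List Int) : Prop := out = balance_lists_alt release press
instance (release : List Int) (press : List Int) (out : List Int × List Int) : Decidable (Spec_balance_lists release press out) := by unfold Spec_balance_lists; infer_instance

-- ===== CLAIM (what is proved, stated in full; the proofs are below) =====
def Claim_equal_balance_lists : Prop := ∀ (release : List Int) (press : List Int), Dom_balance_lists release press → Spec_balance_lists release press (balance_lists release press)

-- ===== LEMMAS AND PROOFS =====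
theorem popUntil_eq_take (xs : List Int) (t : Nat) (h : t ≤ xs.length) :
    popUntil xs t = xs.take t := by
  by_cases hgt : xs.length > t
  · rw [popUntil]
    simp only [hgt, if_true]
    have hlen : xs.dropLast.length = xs.length - 1 := List.length_dropLast
    have ih := popUntil_eq_take xs.dropLast t (by omega)
    rw [ih, List.dropLast_eq_take, List.take_take]
    congr 1
    omega
  · rw [popUntil]
    simp only [hgt, if_false]
    exact (List.take_of_length_le (by omega)).symm
termination_by xs.length
decreasing_by simp [List.length_dropLast]; omega

-- ===== VERDICT (by name: the statement is the Claim_ definition above) =====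
theorem balance_lists_spec : Claim_equal_balance_lists := by
  intro release press _
  unfold Spec_balance_lists balance_lists balance_lists_alt
  by_cases h : press.length > release.length
  · simp only [h, if_true]
    rw [popUntil_eq_take press release.length (by omega)]
    have : min release.length press.length = release.length := by omega
    simp [this]
  · simp only [h, if_false]
    rw [popUntil_eq_take release press.length (by omega)]
    have : min release.length press.length = press.length := by omega
    simp [this]
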